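-- pv_equiv track=rewrite | github.com/tothedarktowercame/futon6 | scripts/normalize-math-prose.py | split_inline_code
-- ===== SOURCE A (Python) =====
-- def split_inline_code(s: str) -> list[tuple[str, str]]:
--     out: list[tuple[str, str]] = []
--     i = 0
--     n = len(s)
--     while i < n:
--         if s[i] == "`":
--             j = s.find("`", i + 1)
--             if j < 0:
--                 out.append(("text", s[i:]))
--                 break
--             out.append(("code", s[i : j + 1]))
--             i = j + 1
--         else:
--             j = s.find("`", i)
--             if j < 0:
--                 out.append(("text", s[i:]))
--                 break
--             out.append(("text", s[i:j]))
--             i = j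
--     return out
-- ===== SOURCE B (Python) =====
-- def split_inline_code(s: str) -> list[tuple[str, str]]:
--     parts = s.split("`")
--     out: list[tuple[str, str]] = []
--     if parts[0]:
--         out.append(("text", parts[0]))
--     ps = parts[1:]
--     k = 0
--     while k < len(ps):
--         if k + 1 < len(ps):
--             out.append(("code", "`" + ps[k] + "`"))
--             if ps[k + 1]:
--                 out.append(("text", ps[k + 1]))
--             k += 2
--         else:
--             out.append(("text", "`" + ps[k]))
--             k += 1
--     return out
-- ===== Notes on version B (the rewrite author's own statement) =====
-- stated objective: alternative
-- what changed: A's index-pointer loop with repeated find calls is replaced by a single split on the backtick character followed by a two-at-a-time walk over the parts (a code span per pair of backticks, an optional text span in between, a dangling last part as the lone-backtick text span).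
import Mathlib
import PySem

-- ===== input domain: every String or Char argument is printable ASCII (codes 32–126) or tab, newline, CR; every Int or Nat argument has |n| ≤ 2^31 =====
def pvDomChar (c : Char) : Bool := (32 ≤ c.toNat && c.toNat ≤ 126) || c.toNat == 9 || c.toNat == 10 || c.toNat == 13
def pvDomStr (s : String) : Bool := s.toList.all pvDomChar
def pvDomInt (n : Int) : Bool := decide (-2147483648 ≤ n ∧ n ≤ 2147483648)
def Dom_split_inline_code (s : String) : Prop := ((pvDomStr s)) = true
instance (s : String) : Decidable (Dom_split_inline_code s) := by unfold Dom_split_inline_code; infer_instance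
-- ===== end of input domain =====

-- B replaces A's index/find scanning loop by one split on the backtick character followed by a pair-walk over the parts (alternative decomposition, same cost).


-- ===== PORT A =====
-- A's while loop over the index i is transcribed as recursion on the remaining suffix s[i:];
-- s.find("`", k) becomes PySem.Chars.find on that suffix (index relative to i).
def splitA_loop (t : List Char) : List (String × String) :=
  match t with
  | [] => []
  | c :: rest =>
    if _hc : c = '`' then
      -- j = s.find("`", i + 1)
      if _hj : PySem.Chars.find rest ['`'] < 0 then
        [("text", String.ofList (c :: rest))]
      else
        ("code", String.ofList (c :: rest.take ((PySem.Chars.find rest ['`']).toNat + 1))) ::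
          splitA_loop (rest.drop ((PySem.Chars.find rest ['`']).toNat + 1))
    else
      -- j = s.find("`", i)
      if _hj : PySem.Chars.find (c :: rest) ['`'] < 0 then
        [("text", String.ofList (c :: rest))]
      else
        ("text", String.ofList ((c :: rest).take (PySem.Chars.find (c :: rest) ['`']).toNat)) ::
          splitA_loop ((c :: rest).drop (PySem.Chars.find (c :: rest) ['`']).toNat)
termination_by t.length
decreasing_by
  · simp [List.length_drop]
  · have h0 : (0:Int) ≤ PySem.Chars.find (c :: rest) ['`'] := by omega
    obtain ⟨hpre, -⟩ := PySem.Chars.find_spec h0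
    have hne : (PySem.Chars.find (c :: rest) ['`']).toNat ≠ 0 := by
      intro h0'
      rw [h0'] at hpre
      obtain ⟨u, hu⟩ := hpre
      simp at hu
      exact _hc hu.1.symm
    simp [List.length_drop]
    omega

def split_inline_code (s : String) : List (String × String) := splitA_loop s.toList

-- ===== PORT B =====
-- B: parts = s.split("`"); emit parts[0] as text if nonempty, then walk the remaining parts
-- two at a time: a full pair gives a code span plus an optional following text span,
-- a leftover single part is the dangling-backtick text span.
def pairsB : List (List Char) → List (String × String)
  | [] => []
  | [p] => [("text", String.ofList ('`' :: p))]
  | p :: q :: rest =>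
    ("code", String.ofList ('`' :: (p ++ ['`']))) ::
      (if q = [] then pairsB rest else ("text", String.ofList q) :: pairsB rest)

def split_inline_code_alt (s : String) : List (String × String) :=
  match s.toList.splitOn '`' with
  | [] => []
  | p0 :: ps => (if p0 = [] then [] else [("text", String.ofList p0)]) ++ pairsB ps

-- ===== PRECONDITION & SPEC =====
def Spec_split_inline_code (s : String) (out : List (String × String)) : Prop := out = split_inline_code_alt s
instance (s : String) (out : List (String × String)) : Decidable (Spec_split_inline_code s out) := by unfold Spec_split_inline_code; infer_instance

-- ===== CLAIM (what is proved, stated in full; the proofs are below) =====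
def Claim_equal_split_inline_code : Prop := ∀ (s : String), Dom_split_inline_code s → Spec_split_inline_code s (split_inline_code s)

-- ===== LEMMAS AND PROOFS =====

-- B's body on a raw character list (proof-side restatement of split_inline_code_alt).
def bodyB (t : List Char) : List (String × String) :=
  match t.splitOn '`' with
  | [] => []
  | p0 :: ps => (if p0 = [] then [] else [("text", String.ofList p0)]) ++ pairsB ps

theorem alt_eq_bodyB (s : String) : split_inline_code_alt s = bodyB s.toList := rfl

-- If find is negative, no character of s is a backtick.
theorem find_neg_all (s : List Char) (h : PySem.Chars.find s ['`'] < 0) :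
    ∀ x ∈ s, x ≠ '`' := by
  have h1 : PySem.Chars.find s ['`'] = -1 := by
    have := PySem.Chars.neg_one_le_find s ['`']
    omega
  have h2 : ¬ ['`'] <:+: s := (PySem.Chars.find_eq_neg_one_iff s ['`']).mp h1
  intro x hx he
  subst he
  obtain ⟨l1, l2, hl⟩ := List.mem_iff_append.mp hx
  exact h2 ⟨l1, l2, by simp [hl]⟩

-- If find is nonnegative, s decomposes at index j = find.toNat into a backtick-free prefix,
-- a backtick, and the rest.
theorem backtick_decomp (s : List Char) (h : ¬ PySem.Chars.find s ['`'] < 0) :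
    (PySem.Chars.find s ['`']).toNat < s.length ∧
    s.drop (PySem.Chars.find s ['`']).toNat =
      '`' :: s.drop ((PySem.Chars.find s ['`']).toNat + 1) ∧
    ∀ x ∈ s.take (PySem.Chars.find s ['`']).toNat, x ≠ '`' := by
  have h0 : (0:Int) ≤ PySem.Chars.find s ['`'] := by omega
  obtain ⟨hpre, hmin⟩ := PySem.Chars.find_spec h0
  obtain ⟨u, hu⟩ := hpre
  have hlt : (PySem.Chars.find s ['`']).toNat < s.length := by
    by_contra hge
    rw [List.drop_eq_nil_of_le (by omega)] at hu
    simp at hu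
  refine ⟨hlt, ?_, ?_⟩
  · have htail : u = s.drop ((PySem.Chars.find s ['`']).toNat + 1) := by
      have := congrArg List.tail hu
      simpa [List.tail_drop] using this
    rw [← hu, htail]
    simp
  · intro x hx he
    subst he
    obtain ⟨i, hi, hget⟩ := List.mem_take_iff_getElem.mp hx
    refine hmin i (by omega) ?_
    rw [List.drop_eq_getElem_cons (by omega)]
    exact ⟨s.drop (i+1), by simp [hget]⟩

-- The simultaneous induction: A's loop equals B's body, and A's loop started at a backtick
-- equals B's pair-walk over the split of the rest.
theorem main_ind : ∀ (n : Nat) (s : List Char), s.length ≤ n →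
    splitA_loop s = bodyB s ∧ splitA_loop ('`' :: s) = pairsB (s.splitOn '`') := by
  intro n
  induction n with
  | zero =>
    intro s hs
    have hnil : s = [] := List.eq_nil_of_length_eq_zero (Nat.le_zero.mp hs)
    subst hnil
    constructor
    · rw [splitA_loop]
      simp [bodyB, pairsB]
    · rw [splitA_loop]
      have hf : PySem.Chars.find ([] : List Char) ['`'] = -1 := by decide
      simp [hf, pairsB]
  | succ n ih =>
    intro s hs
    constructor
    · -- P1 : splitA_loop s = bodyB s
      cases s with
      | nil =>
        rw [splitA_loop]
        simp [bodyB, pairsB]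
      | cons c rest =>
        have hrest : rest.length ≤ n := by simpa using hs
        by_cases hc : c = '`'
        · subst hc
          rw [(ih rest hrest).2]
          simp [bodyB, List.splitOn, List.splitOnP_cons]
        · by_cases hj : PySem.Chars.find (c :: rest) ['`'] < 0
          · have hall := find_neg_all _ hj
            have hsp : (c :: rest).splitOn '`' = [c :: rest] := by
              simp only [List.splitOn]
              exact List.splitOnP_eq_single _ _ (fun x hx => by simp [hall x hx])
            rw [splitA_loop]
            simp [hc, hj, bodyB, hsp, pairsB]
          · obtain ⟨hjlt, hdrop, htake⟩ := backtick_decomp (c :: rest) hj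
            set j := (PySem.Chars.find (c :: rest) ['`']).toNat with hjdef
            have hst : (c :: rest) = (c :: rest).take j ++ '`' :: (c :: rest).drop (j + 1) := by
              conv_lhs => rw [← List.take_append_drop j (c :: rest)]
              rw [hdrop]
            have hsp : (c :: rest).splitOn '`' =
                (c :: rest).take j :: ((c :: rest).drop (j + 1)).splitOn '`' := by
              conv_lhs => rw [hst]
              simp only [List.splitOn]
              exact List.splitOnP_first _ _ (fun x hx => by simp [htake x hx]) '`' (by simp) _
            have htne : (c :: rest).take j ≠ [] := by
              intro h0
              rw [h0] at hst
              simp at hst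
              exact hc hst.1
            have hrlen : ((c :: rest).drop (j + 1)).length ≤ n := by
              simp [List.length_drop]
              omega
            have hP2 := (ih _ hrlen).2
            rw [splitA_loop]
            simp only [hc, hj, dite_false]
            rw [hdrop, hP2, bodyB, hsp]
            simp [htne]
            rfl
    · -- P2 : splitA_loop ('`' :: s) = pairsB (s.splitOn '`')
      by_cases hj : PySem.Chars.find s ['`'] < 0
      · have hall := find_neg_all _ hj
        have hsp : s.splitOn '`' = [s] := by
          simp only [List.splitOn]
          exact List.splitOnP_eq_single _ _ (fun x hx => by simp [hall x hx])
        rw [splitA_loop]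
        simp [hj, hsp, pairsB]
      · obtain ⟨hjlt, hdrop, htake⟩ := backtick_decomp s hj
        set j := (PySem.Chars.find s ['`']).toNat with hjdef
        have hst : s = s.take j ++ '`' :: s.drop (j + 1) := by
          conv_lhs => rw [← List.take_append_drop j s]
          rw [hdrop]
        have hsp : s.splitOn '`' = s.take j :: (s.drop (j + 1)).splitOn '`' := by
          conv_lhs => rw [hst]
          simp only [List.splitOn]
          exact List.splitOnP_first _ _ (fun x hx => by simp [htake x hx]) '`' (by simp) _
        have htlen : (s.take j).length = j := by
          simp [List.length_take]
          omega
        have htake1 : s.take (j + 1) = s.take j ++ ['`'] := by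
          conv_lhs => rw [hst]
          rw [← htlen, List.take_append]
          simp
        obtain ⟨q, rest', hqr⟩ :=
          List.exists_cons_of_ne_nil (l := ((s.drop (j + 1)).splitOn '`'))
            (by simp only [List.splitOn]; exact List.splitOnP_ne_nil _ _)
        have hrlen : (s.drop (j + 1)).length ≤ n := by
          simp [List.length_drop]
          omega
        have hP1 := (ih _ hrlen).1
        rw [splitA_loop]
        simp only [hj, reduceDIte, dite_true]
        rw [htake1, hP1, hsp, hqr, pairsB]
        have hbody : bodyB (s.drop (j + 1)) =
            (if q = [] then [] else [("text", String.ofList q)]) ++ pairsB rest' := by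
          rw [bodyB, hqr]
        rw [hbody]
        by_cases hq : q = [] <;> simp [hq]

-- ===== VERDICT (by name: the statement is the Claim_ definition above) =====
theorem split_inline_code_spec : Claim_equal_split_inline_code := by
  intro s _
  unfold Spec_split_inline_code
  rw [alt_eq_bodyB]
  exact (main_ind s.toList.length s.toList le_rfl).1
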